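-- pv_equiv track=rewrite | github.com/vabsalack/COMPETITIVE-CODING | CSE/CSE330/Primality_test/1.5_Micro and Prime Prime.py | sieve_count
-- ===== SOURCE A (Python) =====
-- def sieve_count(x):
--     sieve1 = [1]*(x+1)
--     sieve1[0] = sieve1[1] = 0
--     for i in range(2, x+1):
--         if sieve1[i] == 1:
--             for j in range(i*i, x+1, i):
--                 sieve1[j] = 0
--     s = 0
--     sie_count1 = [0]*(x+1)
--     for i in range(x+1):
--         s += sieve1[i]
--         sie_count1[i] = s
--     return sieve1, sie_count1
-- ===== SOURCE B (Python) =====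
-- def sieve_count(x):
--     sieve = [1] * (x + 1)
--     sieve[0] = sieve[1] = 0
--     for i in range(2, x + 1):
--         j = 2
--         while j * j <= i:
--             if i % j == 0:
--                 sieve[i] = 0
--                 break
--             j += 1
--     s = 0
--     counts = [0] * (x + 1)
--     for i in range(x + 1):
--         s += sieve[i]
--         counts[i] = s
--     return sieve, counts
-- ===== Notes on version B (the rewrite author's own statement) =====
-- stated objective: alternative
-- what changed: Replaces the Eratosthenes multiple-marking sieve by an independent per-number trial-division primality test (while j*j<=i), keeping the same array initialization and the same cumulative-count pass.
-- outside the precondition, e.g. on sieve_count(0): A raises IndexError, B raises IndexError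
import Mathlib
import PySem

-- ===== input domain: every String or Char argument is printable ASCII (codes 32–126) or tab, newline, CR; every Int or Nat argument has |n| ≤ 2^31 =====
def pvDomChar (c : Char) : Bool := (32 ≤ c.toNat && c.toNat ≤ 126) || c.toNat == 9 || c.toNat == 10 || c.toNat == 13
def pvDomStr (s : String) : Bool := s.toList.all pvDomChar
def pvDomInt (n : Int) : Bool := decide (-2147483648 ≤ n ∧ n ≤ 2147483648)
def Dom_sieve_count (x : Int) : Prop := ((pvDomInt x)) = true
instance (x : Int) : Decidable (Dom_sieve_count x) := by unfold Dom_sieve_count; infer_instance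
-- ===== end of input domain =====

-- B replaces the multiple-marking sieve by an independent trial-division test per number
-- (same initialization, same cumulative-count pass); objective: alternative algorithm, not faster.

-- ===== PORT A =====
-- helpers shared by BOTH ports: these Python lines are token-identical in Source A and Source B.
-- 'sieve1 = [1]*(x+1); sieve1[0] = sieve1[1] = 0'  (pySetD is exact here: Pre_ guarantees 0,1 < len)
def pvInit (x : Int) : List Int :=
  PySem.List.pySetD (PySem.List.pySetD (PySem.List.pyRepeat [(1 : Int)] (x + 1)) 0 0) 1 0

-- 's = 0; c = [0]*(x+1); for i in range(x+1): s += sieve1[i]; c[i] = s; return c'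
def pvCumul (x : Int) (sieve1 : List Int) : List Int :=
  ((PySem.List.pyRange 0 (x + 1) 1).foldl
    (fun (acc : Int × List Int) i =>
      let s := acc.1 + PySem.List.pyGetD sieve1 i 0
      (s, PySem.List.pySetD acc.2 i s))
    (0, PySem.List.pyRepeat [(0 : Int)] (x + 1))).2

def sieve_count (x : Int) : List Int × List Int :=
  let sieve1 :=
    (PySem.List.pyRange 2 (x + 1) 1).foldl
      (fun s i =>
        if PySem.List.pyGetD s i 0 = 1 then
          (PySem.List.pyRange (i * i) (x + 1) i).foldl
            (fun s' j => PySem.List.pySetD s' j 0) s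
        else s)
      (pvInit x)
  (sieve1, pvCumul x sieve1)

-- ===== PORT B =====
-- 'j = 2; while j*j <= i: (if i % j == 0: sieve[i] = 0; break); j += 1'
def pvTrial (s : List Int) (i : Int) (j : Int) : List Int :=
  if h : j * j ≤ i then
    if PySem.Int.mod i j = 0 then PySem.List.pySetD s i 0
    else pvTrial s i (j + 1)
  else s
termination_by (i + 1 - j).toNat
decreasing_by
  have hji : j ≤ i := by
    by_cases h0 : j ≤ 0
    · have := mul_self_nonneg j; omega
    · nlinarith
  omega

def sieve_count_alt (x : Int) : List Int × List Int :=
  let sieve :=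
    (PySem.List.pyRange 2 (x + 1) 1).foldl (fun s i => pvTrial s i 2) (pvInit x)
  (sieve, pvCumul x sieve)

-- ===== PRECONDITION & SPEC =====
-- A raises IndexError on x ≤ 0 (sieve1[0] = sieve1[1] = 0 on a list of length ≤ 1); B raises there too.
def Pre_sieve_count (x : Int) : Prop := 1 ≤ x
instance (x : Int) : Decidable (Pre_sieve_count x) := by unfold Pre_sieve_count; infer_instance
def pvWitness_sieve_count : Int := 10

def Spec_sieve_count (x : Int) (out : List Int × List Int) : Prop := out = sieve_count_alt x
instance (x : Int) (out : List Int × List Int) : Decidable (Spec_sieve_count x out) := by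
  unfold Spec_sieve_count; infer_instance

-- ===== CLAIM (what is proved, stated in full; the proofs are below) =====
def Claim_equal_sieve_count : Prop :=
  ∀ (x : Int), Dom_sieve_count x → Pre_sieve_count x → Spec_sieve_count x (sieve_count x)

-- ===== LEMMAS AND PROOFS =====

-- model values: the sieve entry at index m after the outer loop has processed 2,…,t-1
def pvAval (t m : Nat) : Int :=
  if m ≤ 1 ∨ ∃ p, p < t ∧ p.Prime ∧ p * p ≤ m ∧ p ∣ m then 0 else 1

def pvBval (t m : Nat) : Int :=
  if m ≤ 1 ∨ (m < t ∧ ∃ k, k < m ∧ 2 ≤ k ∧ k * k ≤ m ∧ k ∣ m) then 0 else 1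

-- number theory core
theorem pv_small_div_not_prime {m k : Nat} (h2 : 2 ≤ k) (hsq : k * k ≤ m) (hdvd : k ∣ m) :
    ¬ m.Prime := by
  have hkm : k < m := by nlinarith
  intro hp
  rcases (Nat.Prime.eq_one_or_self_of_dvd hp k hdvd) with h | h <;> omega

theorem pv_not_prime_small_div {m : Nat} (h2 : 2 ≤ m) (hnp : ¬ m.Prime) :
    ∃ p, p.Prime ∧ p * p ≤ m ∧ p ∣ m ∧ p < m := by
  refine ⟨m.minFac, Nat.minFac_prime (by omega), ?_, Nat.minFac_dvd m, ?_⟩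
  · nlinarith [Nat.minFac_sq_le_self (by omega : 0 < m) hnp]
  · have h2p : 2 ≤ m.minFac := (Nat.minFac_prime (by omega : m ≠ 1)).two_le
    nlinarith [Nat.minFac_sq_le_self (by omega : 0 < m) hnp]

theorem pv_aval_eq (t m : Nat) (hmt : m ≤ t) : pvAval t m = (if m.Prime then 1 else 0) := by
  unfold pvAval
  by_cases hm : m ≤ 1
  · have : ¬ m.Prime := by interval_cases m <;> decide
    simp [hm, this]
  · by_cases hp : m.Prime
    · have : ¬ (m ≤ 1 ∨ ∃ p, p < t ∧ p.Prime ∧ p * p ≤ m ∧ p ∣ m) := by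
        rintro (h | ⟨p, _, hpp, hsq, hdvd⟩)
        · omega
        · exact pv_small_div_not_prime hpp.two_le hsq hdvd hp
      simp [this, hp]
    · obtain ⟨p, hpp, hsq, hdvd, hlt⟩ := pv_not_prime_small_div (by omega) hp
      have : m ≤ 1 ∨ ∃ p, p < t ∧ p.Prime ∧ p * p ≤ m ∧ p ∣ m :=
        Or.inr ⟨p, by omega, hpp, hsq, hdvd⟩
      simp [this, hp]

theorem pv_bval_eq (t m : Nat) (hmt : m < t) : pvBval t m = (if m.Prime then 1 else 0) := by
  unfold pvBval
  by_cases hm : m ≤ 1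
  · have : ¬ m.Prime := by interval_cases m <;> decide
    simp [hm, this]
  · by_cases hp : m.Prime
    · have : ¬ (m ≤ 1 ∨ (m < t ∧ ∃ k, k < m ∧ 2 ≤ k ∧ k * k ≤ m ∧ k ∣ m)) := by
        rintro (h | ⟨_, k, _, h2, hsq, hdvd⟩)
        · omega
        · exact pv_small_div_not_prime h2 hsq hdvd hp
      simp [this, hp]
    · obtain ⟨p, hpp, hsq, hdvd, hlt⟩ := pv_not_prime_small_div (by omega) hp
      have : m ≤ 1 ∨ (m < t ∧ ∃ k, k < m ∧ 2 ≤ k ∧ k * k ≤ m ∧ k ∣ m) :=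
        Or.inr ⟨hmt, p, hlt, hpp.two_le, hsq, hdvd⟩
      simp [this, hp]

-- pointwise behaviour of pySetD with value 0 and default 0 (unconditional in the index range)
theorem pv_getD_pySetD (s : List Int) (a : Int) (ha : 0 ≤ a) (m : Nat) :
    PySem.List.pyGetD (PySem.List.pySetD s a 0) (m : Int) 0
      = if (m : Int) = a then 0 else PySem.List.pyGetD s (m : Int) 0 := by
  rw [PySem.List.pySetD_of_nonneg _ _ ha, PySem.List.pyGetD_natCast, PySem.List.pyGetD_natCast]
  by_cases h : m = a.toNat
  · rw [if_pos (by omega)]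
    subst h
    simp only [List.getD_eq_getElem?_getD, List.getElem?_set]
    rw [if_pos trivial]
    split <;> simp
  · rw [if_neg (by omega)]
    simp only [List.getD_eq_getElem?_getD, List.getElem?_set]
    rw [if_neg (by omega : ¬ a.toNat = m)]

theorem pv_fold_set0_length (L : List Int) (s : List Int) :
    (L.foldl (fun s' j => PySem.List.pySetD s' j 0) s).length = s.length := by
  induction L generalizing s with
  | nil => rfl
  | cons a L ih => simp [List.foldl, ih, PySem.List.length_pySetD]

theorem pv_fold_set0_getD (L : List Int) (hL : ∀ j ∈ L, 0 ≤ j) (s : List Int) (m : Nat) :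
    PySem.List.pyGetD (L.foldl (fun s' j => PySem.List.pySetD s' j 0) s) (m : Int) 0
      = if (m : Int) ∈ L then 0 else PySem.List.pyGetD s (m : Int) 0 := by
  induction L generalizing s with
  | nil => simp
  | cons a L ih =>
      have ha : 0 ≤ a := hL a (by simp)
      rw [List.foldl_cons, ih (fun j hj => hL j (by simp [hj])) _,
        pv_getD_pySetD s a ha m]
      by_cases hmem : (m : Int) ∈ L <;> by_cases hma : (m : Int) = a <;>
        simp [hmem, hma, List.mem_cons]

-- initial array
theorem pv_init_length (x : Int) : (pvInit x).length = (x + 1).toNat := by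
  simp [pvInit, PySem.List.pyRepeat_singleton, PySem.List.length_pySetD]

theorem pv_init_getD (x : Int) (hx : 1 ≤ x) (m : Nat) (hm : (m : Int) < x + 1) :
    PySem.List.pyGetD (pvInit x) (m : Int) 0 = if m ≤ 1 then 0 else 1 := by
  unfold pvInit
  rw [pv_getD_pySetD _ 1 (by omega) m, pv_getD_pySetD _ 0 (by omega) m,
    PySem.List.pyRepeat_singleton, PySem.List.pyGetD_natCast]
  rw [List.getD_eq_getElem?_getD]
  have hm' : m < (x + 1).toNat := by omega
  rw [List.getElem?_replicate, if_pos hm']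
  split_ifs <;> simp <;> omega

-- characterisation of the trial-division loop of B
theorem pv_trial_eq_set (s : List Int) (i j : Int) (hj : 0 ≤ j)
    (h : ∃ k : Int, j ≤ k ∧ k * k ≤ i ∧ k ∣ i) :
    pvTrial s i j = PySem.List.pySetD s i 0 := by
  fun_induction pvTrial with
  | case1 j hle hmod => rfl
  | case2 j hle hmod ih =>
      obtain ⟨k, hjk, hk2, hkd⟩ := h
      have hkj : k ≠ j := by
        rintro rfl
        exact hmod ((PySem.Int.mod_eq_zero_iff_dvd _ _).mpr hkd)
      exact ih (by omega) ⟨k, by omega, hk2, hkd⟩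
  | case3 j hle =>
      obtain ⟨k, hjk, hk2, hkd⟩ := h
      have : j * j ≤ k * k := by nlinarith
      omega

theorem pv_trial_eq_self (s : List Int) (i j : Int)
    (h : ∀ k : Int, j ≤ k → k * k ≤ i → ¬ k ∣ i) :
    pvTrial s i j = s := by
  fun_induction pvTrial with
  | case1 j hle hmod =>
      exact absurd ((PySem.Int.mod_eq_zero_iff_dvd _ _).mp hmod) (h j le_rfl hle)
  | case2 j hle hmod ih =>
      exact ih (fun k hk => h k (by omega))
  | case3 j hle => rfl

theorem pv_aval_succ_prime (t m : Nat) (hp : t.Prime) :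
    pvAval (t + 1) m = if t * t ≤ m ∧ t ∣ m then 0 else pvAval t m := by
  unfold pvAval
  by_cases hc : t * t ≤ m ∧ t ∣ m
  · have hL : m ≤ 1 ∨ ∃ p, p < t + 1 ∧ p.Prime ∧ p * p ≤ m ∧ p ∣ m :=
      Or.inr ⟨t, by omega, hp, hc.1, hc.2⟩
    rw [if_pos hL, if_pos hc]
  · rw [if_neg hc]
    refine if_congr ⟨?_, ?_⟩ rfl rfl
    · rintro (h | ⟨p, hpt, hpp, hsq, hdvd⟩)
      · exact Or.inl h
      · rcases Nat.lt_succ_iff_lt_or_eq.mp hpt with h' | rfl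
        · exact Or.inr ⟨p, h', hpp, hsq, hdvd⟩
        · exact absurd ⟨hsq, hdvd⟩ hc
    · rintro (h | ⟨p, hpt, hpp, hsq, hdvd⟩)
      · exact Or.inl h
      · exact Or.inr ⟨p, by omega, hpp, hsq, hdvd⟩

theorem pv_aval_succ_not_prime (t m : Nat) (hp : ¬ t.Prime) :
    pvAval (t + 1) m = pvAval t m := by
  unfold pvAval
  refine if_congr ⟨?_, ?_⟩ rfl rfl
  · rintro (h | ⟨p, hpt, hpp, hsq, hdvd⟩)
    · exact Or.inl h
    · rcases Nat.lt_succ_iff_lt_or_eq.mp hpt with h' | rfl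
      · exact Or.inr ⟨p, h', hpp, hsq, hdvd⟩
      · exact absurd hpp hp
  · rintro (h | ⟨p, hpt, hpp, hsq, hdvd⟩)
    · exact Or.inl h
    · exact Or.inr ⟨p, by omega, hpp, hsq, hdvd⟩

theorem pv_bval_succ_ne (t m : Nat) (hne : m ≠ t) : pvBval (t + 1) m = pvBval t m := by
  unfold pvBval
  refine if_congr ⟨?_, ?_⟩ rfl rfl
  · rintro (h | ⟨h1, h2⟩)
    · exact Or.inl h
    · exact Or.inr ⟨by omega, h2⟩
  · rintro (h | ⟨h1, h2⟩)
    · exact Or.inl h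
    · exact Or.inr ⟨by omega, h2⟩

theorem pv_bval_succ_self (t : Nat) (h2 : 2 ≤ t) :
    pvBval (t + 1) t = if ∃ k, k < t ∧ 2 ≤ k ∧ k * k ≤ t ∧ k ∣ t then 0 else 1 := by
  unfold pvBval
  refine if_congr ⟨?_, ?_⟩ rfl rfl
  · rintro (h | ⟨h1, h2'⟩)
    · omega
    · exact h2'
  · intro h
    exact Or.inr ⟨by omega, h⟩

theorem pv_bval_self (t : Nat) (h2 : 2 ≤ t) : pvBval t t = 1 := by
  unfold pvBval
  rw [if_neg]
  rintro (h | ⟨h1, _⟩) <;> omega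

-- membership in range(t*t, x+1, t) is "multiple of t at least t*t" (below x+1)
theorem pv_mem_range_mult (x t : Int) (h2 : 2 ≤ t) (m : Nat) (hm : (m : Int) < x + 1) :
    ((m : Int) ∈ PySem.List.pyRange (t * t) (x + 1) t) ↔ (t * t ≤ (m : Int) ∧ t ∣ (m : Int)) := by
  rw [PySem.List.mem_pyRange_iff_of_pos (by omega)]
  constructor
  · rintro ⟨ha, hb, hc⟩
    refine ⟨ha, ?_⟩
    have := dvd_add hc (dvd_mul_left t t)
    simpa using this
  · rintro ⟨ha, hc⟩
    exact ⟨ha, hm, dvd_sub hc (dvd_mul_left t t)⟩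

-- loop invariant for A's sieve loop
theorem pv_A_inv (x : Int) (hx : 1 ≤ x) (t : Int) (h2 : 2 ≤ t) (ht : t ≤ x + 1) :
    ((PySem.List.pyRange 2 t 1).foldl
        (fun s i =>
          if PySem.List.pyGetD s i 0 = 1 then
            (PySem.List.pyRange (i * i) (x + 1) i).foldl
              (fun s' j => PySem.List.pySetD s' j 0) s
          else s)
        (pvInit x)).length = (x + 1).toNat ∧
    ∀ m : Nat, (m : Int) < x + 1 →
      PySem.List.pyGetD
        ((PySem.List.pyRange 2 t 1).foldl
          (fun s i =>
            if PySem.List.pyGetD s i 0 = 1 then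
              (PySem.List.pyRange (i * i) (x + 1) i).foldl
                (fun s' j => PySem.List.pySetD s' j 0) s
            else s)
          (pvInit x)) (m : Int) 0 = pvAval t.toNat m := by
  revert ht
  induction t, h2 using Int.le_induction with
  | base =>
      intro _
      rw [PySem.List.pyRange_one_eq_nil (by omega), List.foldl_nil]
      refine ⟨pv_init_length x, ?_⟩
      intro m hm
      rw [pv_init_getD x hx m hm]
      unfold pvAval
      have hno : ¬ ∃ p, p < (2 : Int).toNat ∧ p.Prime ∧ p * p ≤ m ∧ p ∣ m := by
        rintro ⟨p, hp, hpp, -, -⟩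
        have := hpp.two_le
        omega
      by_cases hm1 : m ≤ 1
      · rw [if_pos (Or.inl hm1), if_pos hm1]
      · rw [if_neg hm1, if_neg (fun hcon => hcon.elim hm1 hno)]
  | succ t h2t ih =>
      intro ht
      obtain ⟨tn, rfl⟩ : ∃ tn : Nat, (tn : Int) = t := ⟨t.toNat, by omega⟩
      obtain ⟨ihlen, ihget⟩ := ih (by omega)
      have h2n : 2 ≤ tn := by omega
      rw [PySem.List.pyRange_one_succ_right (by omega : (2 : Int) ≤ (tn : Int)),
        List.foldl_append, List.foldl_cons, List.foldl_nil]
      have htest := ihget tn (by omega)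
      rw [Int.toNat_natCast] at ihget htest
      rw [htest, pv_aval_eq tn tn le_rfl,
        show ((tn : Int) + 1).toNat = tn + 1 from by omega]
      by_cases hp : tn.Prime
      · rw [if_pos hp, if_pos rfl]
        refine ⟨by rw [pv_fold_set0_length]; exact ihlen, ?_⟩
        intro m hm
        have hL : ∀ j ∈ PySem.List.pyRange ((tn : Int) * tn) (x + 1) tn, 0 ≤ j := by
          intro j hj
          rw [PySem.List.mem_pyRange_iff_of_pos (by omega)] at hj
          have := hj.1
          nlinarith
        rw [pv_fold_set0_getD _ hL _ m, ihget m hm, pv_aval_succ_prime tn m hp]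
        refine if_congr ?_ rfl rfl
        rw [pv_mem_range_mult x tn (by omega) m hm]
        constructor
        · rintro ⟨ha, hb⟩
          exact ⟨by exact_mod_cast ha, by exact_mod_cast hb⟩
        · rintro ⟨ha, hb⟩
          exact ⟨by exact_mod_cast ha, by exact_mod_cast hb⟩
      · rw [if_neg hp, if_neg (by norm_num)]
        refine ⟨ihlen, ?_⟩
        intro m hm
        rw [ihget m hm, pv_aval_succ_not_prime tn m hp]

-- loop invariant for B's trial-division loop
theorem pv_B_inv (x : Int) (hx : 1 ≤ x) (t : Int) (h2 : 2 ≤ t) (ht : t ≤ x + 1) :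
    ((PySem.List.pyRange 2 t 1).foldl (fun s i => pvTrial s i 2) (pvInit x)).length
        = (x + 1).toNat ∧
    ∀ m : Nat, (m : Int) < x + 1 →
      PySem.List.pyGetD
        ((PySem.List.pyRange 2 t 1).foldl (fun s i => pvTrial s i 2) (pvInit x)) (m : Int) 0
        = pvBval t.toNat m := by
  revert ht
  induction t, h2 using Int.le_induction with
  | base =>
      intro _
      rw [PySem.List.pyRange_one_eq_nil (by omega), List.foldl_nil]
      refine ⟨pv_init_length x, ?_⟩
      intro m hm
      rw [pv_init_getD x hx m hm]
      unfold pvBval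
      by_cases hm1 : m ≤ 1
      · rw [if_pos (Or.inl hm1), if_pos hm1]
      · rw [if_neg hm1, if_neg
          (fun hcon => hcon.elim hm1 (fun h => absurd h.1 (by omega)))]
  | succ t h2t ih =>
      intro ht
      obtain ⟨tn, rfl⟩ : ∃ tn : Nat, (tn : Int) = t := ⟨t.toNat, by omega⟩
      obtain ⟨ihlen, ihget⟩ := ih (by omega)
      have h2n : 2 ≤ tn := by omega
      rw [PySem.List.pyRange_one_succ_right (by omega : (2 : Int) ≤ (tn : Int)),
        List.foldl_append, List.foldl_cons, List.foldl_nil]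
      rw [Int.toNat_natCast] at ihget
      rw [show ((tn : Int) + 1).toNat = tn + 1 from by omega]
      by_cases hdiv : ∃ k, k < tn ∧ 2 ≤ k ∧ k * k ≤ tn ∧ k ∣ tn
      · obtain ⟨k, hklt, hk2, hksq, hkdvd⟩ := hdiv
        rw [pv_trial_eq_set _ _ 2 (by omega)
          ⟨(k : Int), by exact_mod_cast hk2, by exact_mod_cast hksq, by exact_mod_cast hkdvd⟩]
        refine ⟨by rw [PySem.List.length_pySetD]; exact ihlen, ?_⟩
        intro m hm
        rw [pv_getD_pySetD _ _ (by omega : (0 : Int) ≤ (tn : Int)) m]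
        by_cases hmt : m = tn
        · subst hmt
          rw [if_pos rfl, pv_bval_succ_self m h2n,
            if_pos ⟨k, hklt, hk2, hksq, hkdvd⟩]
        · rw [if_neg (by omega), ihget m hm, pv_bval_succ_ne tn m hmt]
      · have hall : ∀ k : Int, 2 ≤ k → k * k ≤ (tn : Int) → ¬ k ∣ (tn : Int) := by
          intro k hk2 hksq hkdvd
          lift k to Nat using (by omega) with kn
          refine hdiv ⟨kn, ?_, by exact_mod_cast hk2, by exact_mod_cast hksq,
            by exact_mod_cast hkdvd⟩
          have h1 : 2 ≤ kn := by exact_mod_cast hk2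
          have h2 : kn * kn ≤ tn := by exact_mod_cast hksq
          nlinarith
        rw [pv_trial_eq_self _ _ 2 hall]
        refine ⟨ihlen, ?_⟩
        intro m hm
        rw [ihget m hm]
        by_cases hmt : m = tn
        · subst hmt
          rw [pv_bval_self m h2n, pv_bval_succ_self m h2n, if_neg hdiv]
        · rw [pv_bval_succ_ne tn m hmt]

theorem pv_sieves_eq (x : Int) (hx : 1 ≤ x) :
    (PySem.List.pyRange 2 (x + 1) 1).foldl
      (fun s i =>
        if PySem.List.pyGetD s i 0 = 1 then
          (PySem.List.pyRange (i * i) (x + 1) i).foldl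
            (fun s' j => PySem.List.pySetD s' j 0) s
        else s)
      (pvInit x)
    = (PySem.List.pyRange 2 (x + 1) 1).foldl (fun s i => pvTrial s i 2) (pvInit x) := by
  obtain ⟨la, ga⟩ := pv_A_inv x hx (x + 1) (by omega) le_rfl
  obtain ⟨lb, gb⟩ := pv_B_inv x hx (x + 1) (by omega) le_rfl
  refine List.ext_getElem (by rw [la, lb]) ?_
  intro k h1 h2
  have hk : (k : Int) < x + 1 := by rw [la] at h1; omega
  have e1 := ga k hk
  have e2 := gb k hk
  rw [PySem.List.pyGetD_eq_getElem _ 0 (by omega) (by rw [la]; omega)] at e1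
  rw [PySem.List.pyGetD_eq_getElem _ 0 (by omega) (by rw [lb]; omega)] at e2
  simp only [Int.toNat_natCast] at e1 e2
  rw [pv_aval_eq _ _ (by rw [la] at h1; omega)] at e1
  rw [pv_bval_eq _ _ (by rw [lb] at h2; omega)] at e2
  exact e1.trans e2.symm

-- ===== VERDICT (by name: the statement is the Claim_ definition above) =====
theorem sieve_count_spec : Claim_equal_sieve_count := by
  intro x _ hpre
  unfold Spec_sieve_count sieve_count sieve_count_alt
  rw [pv_sieves_eq x hpre]
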